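-- pv_equiv track=rewrite | github.com/ursakumeljfaks/Prakticna-matematika | 1.letnik/programiranje1/izpiti/izpitiPeF.py | rezultati
-- ===== SOURCE A (Python) =====
-- def rezultati(s):
--     zmnozki = []
--     for oseba in s:
--         zmnozek = oseba[1] * oseba[2] * oseba[3]
--         zmnozki.append(zmnozek)
--
--     prvi = zmnozki[0]
--     for indeks, posamezen in enumerate(zmnozki):
--         if posamezen >= prvi:
--             prvi = posamezen
--             zalomljen = True
--         else:
--             zalomljen = indeks
--     return zalomljen
-- ===== SOURCE B (Python) =====
-- def rezultati(s):
--     prods = [o[1] * o[2] * o[3] for o in s]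
--     last = prods[-1]
--     if any(p > last for p in prods):
--         return len(prods) - 1
--     return True
-- ===== Notes on version B (the rewrite author's own statement) =====
-- stated objective: alternative
-- what changed: B computes no maximum at all: instead of A's per-element running-max state loop it makes one existence check -- does any product strictly exceed the last one -- with any() and early exit, returning the last index if so and True otherwise.
-- outside the precondition, e.g. on rezultati([(0, 0, 0, 0)]): A returns True, B returns True; on rezultati([(1, 1, 1, 1), (1, 2, 2, 2)]): A returns True, B returns True
import Mathlib
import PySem

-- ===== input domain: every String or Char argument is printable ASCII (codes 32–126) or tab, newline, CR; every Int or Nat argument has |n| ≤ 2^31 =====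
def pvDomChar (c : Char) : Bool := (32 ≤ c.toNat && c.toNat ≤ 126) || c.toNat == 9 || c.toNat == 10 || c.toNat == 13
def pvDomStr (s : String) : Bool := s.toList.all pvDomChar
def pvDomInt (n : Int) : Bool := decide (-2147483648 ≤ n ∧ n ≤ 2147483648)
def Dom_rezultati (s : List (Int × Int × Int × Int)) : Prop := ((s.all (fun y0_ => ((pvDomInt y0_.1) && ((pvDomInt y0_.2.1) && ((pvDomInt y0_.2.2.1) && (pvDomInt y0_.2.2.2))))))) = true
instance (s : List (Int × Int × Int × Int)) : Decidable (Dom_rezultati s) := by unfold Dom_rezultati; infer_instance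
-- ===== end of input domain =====

-- B replaces A's running-max state loop by a single existence check (any product strictly
-- greater than the last one?) with no maximum computed; equivalence of RETURN values on the
-- inputs where A returns an int index (Python's True is outside the Int return type).

-- ===== PORT A =====
-- the 'for indeks, posamezen in enumerate(zmnozki)' loop with state (prvi, zalomljen);
-- zalomljen = 1 renders Python's True
def rezLoop : List Int → Int → Int → Int → Int × Int
  | [], prvi, zal, _ => (prvi, zal)
  | x :: xs, prvi, zal, i =>
    if x ≥ prvi then rezLoop xs x 1 (i + 1)
    else rezLoop xs prvi i (i + 1)

def rezultati (s : List (Int × Int × Int × Int)) : Int :=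
  let zmnozki := s.foldl (fun acc oseba => acc ++ [oseba.2.1 * oseba.2.2.1 * oseba.2.2.2]) []
  match zmnozki with
  | [] => 0   -- unreachable under Pre_: Python raises IndexError at zmnozki[0]
  | prvi :: _ => (rezLoop zmnozki prvi 0 0).2

-- ===== PORT B =====
-- 'any(p > last for p in prods)' is List.any; 1 renders Python's True
def rezultati_alt (s : List (Int × Int × Int × Int)) : Int :=
  let prods := s.map (fun o => o.2.1 * o.2.2.1 * o.2.2.2)
  match PySem.List.pyGet? prods (-1) with
  | none => 0   -- unreachable under Pre_: Python raises IndexError at prods[-1]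
  | some last => if prods.any (fun p => decide (p > last)) then (prods.length : Int) - 1 else 1

-- ===== PRECONDITION & SPEC =====
-- Pre_ excludes the empty list (both Pythons raise IndexError) and the inputs on which A
-- returns the bool True rather than an int index: those where the last product is >= every
-- preceding product (True is outside the Int return type).
def pvProds (s : List (Int × Int × Int × Int)) : List Int :=
  s.map (fun o => o.2.1 * o.2.2.1 * o.2.2.2)
def Pre_rezultati (s : List (Int × Int × Int × Int)) : Prop :=
  2 ≤ s.length ∧
    (pvProds s).getLastD 0 < (pvProds s).dropLast.foldl max ((pvProds s).headD 0)
instance (s : List (Int × Int × Int × Int)) : Decidable (Pre_rezultati s) := by unfold Pre_rezultati; infer_instance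
def pvWitness_rezultati : (List (Int × Int × Int × Int)) := [(1, 2, 3, 1), (2, 1, 1, 1)]

def Spec_rezultati (s : List (Int × Int × Int × Int)) (out : Int) : Prop := out = rezultati_alt s
instance (s : List (Int × Int × Int × Int)) (out : Int) : Decidable (Spec_rezultati s out) := by unfold Spec_rezultati; infer_instance

-- ===== CLAIM (what is proved, stated in full; the proofs are below) =====
def Claim_equal_rezultati : Prop := ∀ (s : List (Int × Int × Int × Int)), Dom_rezultati s → Pre_rezultati s → Spec_rezultati s (rezultati s)

-- ===== LEMMAS AND PROOFS =====

-- A's append-loop builds just the map of products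
theorem products_eq (s : List (Int × Int × Int × Int)) (acc : List Int) :
    s.foldl (fun acc oseba => acc ++ [oseba.2.1 * oseba.2.2.1 * oseba.2.2.2]) acc
      = acc ++ s.map (fun oseba => oseba.2.1 * oseba.2.2.1 * oseba.2.2.2) := by
  induction s generalizing acc with
  | nil => simp [List.foldl]
  | cons h t ih => simp [List.foldl, ih]

-- the if-branch of rezLoop updates prvi to the running max
theorem rezLoop_max_step (x prvi : Int) :
    (if x ≥ prvi then x else prvi) = max prvi x := by
  rcases le_total prvi x with h | h <;> simp [max_eq_left, max_eq_right, h] <;> omega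

-- characterisation of the loop's returned zalomljen on a nonempty remainder
theorem rezLoop_snd (l : List Int) (hl : l ≠ []) (prvi zal i : Int) :
    (rezLoop l prvi zal i).2
      = if l.getLast hl ≥ l.dropLast.foldl max prvi then 1 else i + l.length - 1 := by
  induction l generalizing prvi zal i with
  | nil => exact absurd rfl hl
  | cons x xs ih =>
    cases xs with
    | nil =>
      by_cases h : x ≥ prvi <;> simp [rezLoop, h]
    | cons y ys =>
      have hxs : (y :: ys) ≠ [] := by simp
      have hlast : (x :: y :: ys).getLast (by simp) = (y :: ys).getLast hxs := by
        simp [List.getLast]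
      have hstep : (rezLoop (x :: y :: ys) prvi zal i).2
          = (rezLoop (y :: ys) (if x ≥ prvi then x else prvi) (if x ≥ prvi then 1 else i) (i + 1)).2 := by
        by_cases h : x ≥ prvi <;> simp [rezLoop, h]
      rw [hstep, ih hxs, hlast]
      have hdl : (x :: y :: ys).dropLast = x :: (y :: ys).dropLast := by simp
      rw [hdl]
      simp only [List.foldl, rezLoop_max_step]
      by_cases h : (y :: ys).getLast hxs ≥ ((y :: ys).dropLast).foldl max (max prvi x)
      · simp [h]
      · simp only [h, if_false, List.length_cons]
        push_cast
        ring

-- foldl max lands on its seed or on one of the list's elements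
theorem foldl_max_mem (l : List Int) (a : Int) :
    l.foldl max a = a ∨ l.foldl max a ∈ l := by
  induction l generalizing a with
  | nil => exact Or.inl rfl
  | cons x xs ih =>
    simp only [List.foldl]
    rcases ih (max a x) with h | h
    · rcases max_choice a x with hm | hm
      · exact Or.inl (h.trans hm)
      · exact Or.inr (by rw [h, hm]; simp)
    · exact Or.inr (by simp [h])

-- ===== VERDICT (by name: the statement is the Claim_ definition above) =====
theorem rezultati_spec : Claim_equal_rezultati := by
  intro s _ hpre
  unfold Spec_rezultati rezultati rezultati_alt
  rw [products_eq]
  simp only [List.nil_append]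
  obtain ⟨hlen, hlt⟩ := hpre
  unfold pvProds at hlt
  cases hs : s.map (fun o => o.2.1 * o.2.2.1 * o.2.2.2) with
  | nil =>
    exfalso
    have : s.length = 0 := by
      have := congrArg List.length hs; simpa using this
    omega
  | cons p t =>
    rw [hs] at hlt
    have hne : (p :: t) ≠ [] := by simp
    have hA : (match p :: t with
        | [] => (0 : Int)
        | prvi :: _ => (rezLoop (p :: t) prvi 0 0).2) = (rezLoop (p :: t) p 0 0).2 := rfl
    rw [hA, rezLoop_snd (p :: t) hne p 0 0]
    rw [PySem.List.pyGet?_neg_one]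
    have hgl : (p :: t).getLast? = some ((p :: t).getLast hne) := by
      simp [List.getLast?_eq_getLast]
    rw [hgl]
    have hlast : (p :: t).getLastD 0 = (p :: t).getLast hne := by
      simp [List.getLastD_eq_getLast?, List.getLast?_eq_getLast]
    have hhead : (p :: t).headD 0 = p := rfl
    rw [hlast, hhead] at hlt
    -- the running-max condition is false under Pre_
    have hcond : ¬ ((p :: t).getLast hne ≥ ((p :: t).dropLast).foldl max p) := by omega
    -- B's any-check fires: the foldl-max value is p or an element of dropLast, hence in p :: t
    have hany : (p :: t).any (fun q => decide (q > (p :: t).getLast hne)) = true := by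
      rw [List.any_eq_true]
      set m := ((p :: t).dropLast).foldl max p with hm
      rcases foldl_max_mem ((p :: t).dropLast) p with h | h
      · exact ⟨p, by simp, by rw [← hm] at h; rw [decide_eq_true_iff]; omega⟩
      · refine ⟨m, ?_, by rw [decide_eq_true_iff]; omega⟩
        rw [← hm] at h
        exact (List.dropLast_sublist (p :: t)).mem h
    simp only [hcond, if_false, hany, if_true]
    omega
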